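-- pv_equiv track=rewrite | github.com/sairamsubramaniam/useful_tidbits | memoryless_batching/memoryless_batching_for_lambda.py | split_if_large
-- ===== SOURCE A (Python) =====
-- def split_if_large(batch_size, batch_num, split_by, max_events_to_sqs, page_offset):
--     final_output=[]
--     if batch_size > max_events_to_sqs:
--         new_batch_size = int(batch_size / split_by)
--         prev_batch = batch_num - 1
--         last_num = split_by * batch_num
--         new_batches = range( (prev_batch*split_by)+1, last_num+1 )
--         x = []
--         for b in new_batches:
--             x += split_if_large(new_batch_size, b, split_by, max_events_to_sqs, page_offset)
--         return x
--     else: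
--         return [(batch_size, batch_num+page_offset, split_by)]
-- ===== SOURCE B (Python) =====
-- def split_if_large(batch_size, batch_num, split_by, max_events_to_sqs, page_offset):
--     leaf = batch_size
--     depth = 0
--     while leaf > max_events_to_sqs:
--         leaf = int(leaf / split_by)
--         depth += 1
--     p = split_by ** depth
--     start = (batch_num - 1) * p + 1
--     return [(leaf, b + page_offset, split_by) for b in range(start, batch_num * p + 1)]
-- ===== Notes on version B (the rewrite author's own statement) =====
-- stated objective: simpler
-- what changed: Replaces the geometric recursion (each oversized batch recursing into split_by children) by an iterative closed-form: a while loop computes the leaf size and split depth, then one range of contiguous leaf batch numbers is mapped to the output.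
-- outside the precondition, e.g. on split_if_large(10, 1, -1, -20, 0): A returns [], B does not finish within the time limit; on split_if_large(1, 1, 2, -5, 0): A raises RecursionError, B does not finish within the time limit
import Mathlib
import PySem

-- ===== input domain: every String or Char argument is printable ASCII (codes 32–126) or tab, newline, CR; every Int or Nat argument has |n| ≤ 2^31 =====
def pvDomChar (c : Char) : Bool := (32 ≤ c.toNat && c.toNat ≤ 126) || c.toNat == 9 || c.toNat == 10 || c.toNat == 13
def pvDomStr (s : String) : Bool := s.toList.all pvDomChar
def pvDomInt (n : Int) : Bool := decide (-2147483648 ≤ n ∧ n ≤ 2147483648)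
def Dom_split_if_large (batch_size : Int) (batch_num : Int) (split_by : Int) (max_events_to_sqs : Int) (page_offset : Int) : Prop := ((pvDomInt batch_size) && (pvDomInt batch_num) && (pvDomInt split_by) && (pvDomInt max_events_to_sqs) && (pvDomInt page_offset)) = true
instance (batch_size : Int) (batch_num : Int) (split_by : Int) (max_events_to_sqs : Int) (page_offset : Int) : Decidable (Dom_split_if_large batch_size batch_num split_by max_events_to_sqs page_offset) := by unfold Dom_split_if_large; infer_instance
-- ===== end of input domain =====

-- B replaces A's geometric recursion by an iterative depth/leaf-size computation plus one mapped range (objective: simpler).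

-- fuel bounds (one per port): under Pre_ the recursion/loop depth is at most batch_size.toNat ≤ 2^31,
-- so the fuel is never exhausted on admitted inputs (proved via the `toNat < fuel` hypotheses below).
def pvFuelA : Nat := 2 ^ 31 + 2

-- ===== PORT A =====
-- literal port of A; `int(batch_size / split_by)` is PySem.Int.truncdiv (exact for |args| < 2^53, which Dom guarantees)
def splitA (fuel : Nat) (batch_size batch_num split_by max_events_to_sqs page_offset : Int) : List (Int × Int × Int) :=
  match fuel with
  | 0 => []
  | f + 1 =>
    if batch_size > max_events_to_sqs then
      let new_batch_size := PySem.Int.truncdiv batch_size split_by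
      let prev_batch := batch_num - 1
      let last_num := split_by * batch_num
      let new_batches := PySem.List.pyRange (prev_batch * split_by + 1) (last_num + 1) 1
      new_batches.foldl (fun x b => x ++ splitA f new_batch_size b split_by max_events_to_sqs page_offset) []
    else
      [(batch_size, batch_num + page_offset, split_by)]

def split_if_large (batch_size : Int) (batch_num : Int) (split_by : Int) (max_events_to_sqs : Int) (page_offset : Int) : List (Int × Int × Int) :=
  splitA pvFuelA batch_size batch_num split_by max_events_to_sqs page_offset

-- ===== PORT B =====
def pvFuelB : Nat := 2 ^ 31 + 2

-- the while loop of Source B: returns the final (leaf, depth)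
def altLoop (fuel : Nat) (leaf : Int) (depth : Nat) (split_by max_events_to_sqs : Int) : Int × Nat :=
  match fuel with
  | 0 => (leaf, depth)
  | f + 1 =>
    if leaf > max_events_to_sqs then
      altLoop f (PySem.Int.truncdiv leaf split_by) (depth + 1) split_by max_events_to_sqs
    else
      (leaf, depth)

def split_if_large_alt (batch_size : Int) (batch_num : Int) (split_by : Int) (max_events_to_sqs : Int) (page_offset : Int) : List (Int × Int × Int) :=
  (PySem.List.pyRange
      ((batch_num - 1) * split_by ^ (altLoop pvFuelB batch_size 0 split_by max_events_to_sqs).2 + 1)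
      (batch_num * split_by ^ (altLoop pvFuelB batch_size 0 split_by max_events_to_sqs).2 + 1) 1).map
    (fun b => ((altLoop pvFuelB batch_size 0 split_by max_events_to_sqs).1, b + page_offset, split_by))

-- ===== PRECONDITION & SPEC =====
-- Pre_ excludes inputs with batch_size > max_events_to_sqs where split_by < 2 or max_events_to_sqs < 0:
-- there A raises ZeroDivisionError or RecursionError, or (split_by negative) returns [] from empty ranges
-- while B's while loop does not terminate.
def Pre_split_if_large (batch_size : Int) (batch_num : Int) (split_by : Int) (max_events_to_sqs : Int) (page_offset : Int) : Prop :=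
  batch_size ≤ max_events_to_sqs ∨ (2 ≤ split_by ∧ 0 ≤ max_events_to_sqs)
instance (batch_size : Int) (batch_num : Int) (split_by : Int) (max_events_to_sqs : Int) (page_offset : Int) : Decidable (Pre_split_if_large batch_size batch_num split_by max_events_to_sqs page_offset) := by unfold Pre_split_if_large; infer_instance

def pvWitness_split_if_large : Int × Int × Int × Int × Int := (10, 1, 2, 3, 0)

def Spec_split_if_large (batch_size : Int) (batch_num : Int) (split_by : Int) (max_events_to_sqs : Int) (page_offset : Int) (out : List (Int × Int × Int)) : Prop := out = split_if_large_alt batch_size batch_num split_by max_events_to_sqs page_offset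
instance (batch_size : Int) (batch_num : Int) (split_by : Int) (max_events_to_sqs : Int) (page_offset : Int) (out : List (Int × Int × Int)) : Decidable (Spec_split_if_large batch_size batch_num split_by max_events_to_sqs page_offset out) := by unfold Spec_split_if_large; infer_instance

-- ===== CLAIM (what is proved, stated in full; the proofs are below) =====
def Claim_equal_split_if_large : Prop := ∀ (batch_size : Int) (batch_num : Int) (split_by : Int) (max_events_to_sqs : Int) (page_offset : Int), Dom_split_if_large batch_size batch_num split_by max_events_to_sqs page_offset → Pre_split_if_large batch_size batch_num split_by max_events_to_sqs page_offset → Spec_split_if_large batch_size batch_num split_by max_events_to_sqs page_offset (split_if_large batch_size batch_num split_by max_events_to_sqs page_offset)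

-- ===== LEMMAS AND PROOFS =====

-- the accumulator of the while-loop port only shifts the depth
lemma altLoop_shift (sb mx : Int) : ∀ (f : Nat) (leaf : Int) (dep : Nat),
    altLoop f leaf dep sb mx = ((altLoop f leaf 0 sb mx).1, dep + (altLoop f leaf 0 sb mx).2) := by
  intro f
  induction f with
  | zero => intro leaf dep; simp [altLoop]
  | succ f ih =>
    intro leaf dep
    have step : ∀ (l : Int) (d : Nat), altLoop (f + 1) l d sb mx
        = if l > mx then altLoop f (PySem.Int.truncdiv l sb) (d + 1) sb mx else (l, d) :=
      fun _ _ => rfl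
    simp only [step]
    by_cases h : leaf > mx
    · rw [if_pos h, if_pos h, ih (PySem.Int.truncdiv leaf sb) (dep + 1),
        ih (PySem.Int.truncdiv leaf sb) 1]
      rw [Prod.mk.injEq]
      exact ⟨rfl, by omega⟩
    · rw [if_neg h, if_neg h, Prod.mk.injEq]
      exact ⟨rfl, by omega⟩

-- gluing contiguous leaf ranges: the children's leaf intervals concatenate to the parent's
lemma range_glue (g : Int → Int × Int × Int) (P : Int) (hP : 0 ≤ P) :
    ∀ (n : Nat) (a : Int),
      (PySem.List.pyRange a (a + (n : Int)) 1).flatMap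
          (fun b => (PySem.List.pyRange ((b - 1) * P + 1) (b * P + 1) 1).map g)
        = (PySem.List.pyRange ((a - 1) * P + 1) ((a + (n : Int) - 1) * P + 1) 1).map g := by
  intro n
  induction n with
  | zero =>
    intro a
    have h0 : a + ((0 : Nat) : Int) = a := by push_cast; ring
    rw [h0, PySem.List.pyRange_one_eq_nil (le_refl a),
      PySem.List.pyRange_one_eq_nil (le_refl ((a - 1) * P + 1))]
    rfl
  | succ n ih =>
    intro a
    have hcast : a + ((n + 1 : Nat) : Int) = (a + 1) + (n : Int) := by push_cast; ring
    rw [hcast, PySem.List.pyRange_one_cons (by omega), List.flatMap_cons, ih (a + 1)]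
    have h1 : (a + 1 - 1) * P + 1 = a * P + 1 := by ring
    have h2 : (a + 1 + (n : Int) - 1) * P + 1 = (a + (n : Int)) * P + 1 := by ring
    rw [h1, h2, ← List.map_append]
    have hle1 : (a - 1) * P + 1 ≤ a * P + 1 := by nlinarith
    have hle2 : a * P + 1 ≤ (a + (n : Int)) * P + 1 := by nlinarith
    rw [← PySem.List.pyRange_one_append ((a - 1) * P + 1) (a * P + 1) ((a + (n : Int)) * P + 1) hle1 hle2]

-- main invariant: A's recursion at sufficient fuel equals B's closed form at the same fuel
lemma splitA_eq (sb mx po : Int) :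
    ∀ (f : Nat) (bs bn : Int), bs.toNat < f → (bs ≤ mx ∨ (2 ≤ sb ∧ 0 ≤ mx)) →
      splitA f bs bn sb mx po
        = (PySem.List.pyRange ((bn - 1) * sb ^ (altLoop f bs 0 sb mx).2 + 1)
              (bn * sb ^ (altLoop f bs 0 sb mx).2 + 1) 1).map
            (fun b => ((altLoop f bs 0 sb mx).1, b + po, sb)) := by
  intro f
  induction f with
  | zero => intro bs bn hf _; omega
  | succ f ih =>
    intro bs bn hf hPre
    by_cases h : bs > mx
    · obtain ⟨hsb, hmx⟩ : 2 ≤ sb ∧ 0 ≤ mx := by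
        rcases hPre with h' | h'
        · omega
        · exact h'
      have hbs0 : 0 < bs := by omega
      set nbs := PySem.Int.truncdiv bs sb with hnbs
      have htd : nbs = bs / sb := by
        rw [hnbs]
        exact Int.tdiv_eq_ediv_of_nonneg (by omega)
      have hnn : 0 ≤ nbs := by rw [htd]; exact Int.ediv_nonneg (by omega) (by omega)
      have hlt : nbs < bs := by
        rw [htd, Int.ediv_lt_iff_lt_mul (by omega)]
        nlinarith
      have hf' : nbs.toNat < f := by omega
      have hloop : altLoop (f + 1) bs 0 sb mx
          = ((altLoop f nbs 0 sb mx).1, 1 + (altLoop f nbs 0 sb mx).2) := by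
        simp only [altLoop, if_pos h, ← hnbs]
        exact altLoop_shift sb mx f nbs 1
      have hA : splitA (f + 1) bs bn sb mx po
          = (PySem.List.pyRange ((bn - 1) * sb + 1) (sb * bn + 1) 1).foldl
              (fun x b => x ++ splitA f nbs b sb mx po) [] := by
        simp only [splitA, if_pos h, ← hnbs]
      rw [hA, hloop]
      rw [PySem.List.foldl_append_eq_flatMap]
      set P : Int := sb ^ (altLoop f nbs 0 sb mx).2 with hPdef
      have hP : 0 ≤ P := pow_nonneg (by omega) _
      have hIH : ∀ b, splitA f nbs b sb mx po
          = (PySem.List.pyRange ((b - 1) * P + 1) (b * P + 1) 1).map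
              (fun b' => ((altLoop f nbs 0 sb mx).1, b' + po, sb)) := by
        intro b; exact ih nbs b hf' (Or.inr ⟨hsb, hmx⟩)
      simp only [hIH]
      have hs : (sb.toNat : Int) = sb := by omega
      have hsplit : sb * bn + 1 = ((bn - 1) * sb + 1) + ((sb.toNat : Int)) := by
        rw [hs]; ring
      rw [hsplit, range_glue _ P hP sb.toNat ((bn - 1) * sb + 1), List.nil_append]
      have hpow : sb ^ (1 + (altLoop f nbs 0 sb mx).2) = sb * P := by
        rw [hPdef, pow_add, pow_one]
      rw [hpow]
      simp only [hs]
      have hb1 : ((bn - 1) * sb + 1 - 1) * P + 1 = (bn - 1) * (sb * P) + 1 := by ring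
      have hb2 : ((bn - 1) * sb + 1 + sb - 1) * P + 1 = bn * (sb * P) + 1 := by ring
      rw [hb1, hb2]
    · have hA : splitA (f + 1) bs bn sb mx po = [(bs, bn + po, sb)] := by
        simp only [splitA, if_neg h]
      have hL : altLoop (f + 1) bs 0 sb mx = (bs, 0) := by
        simp only [altLoop, if_neg h]
      rw [hA, hL]
      have h1 : (bn - 1) * sb ^ ((bs, (0 : Nat)).2) + 1 = bn := by
        norm_num
      have h2 : bn * sb ^ ((bs, (0 : Nat)).2) + 1 = bn + 1 := by
        norm_num
      rw [h1, h2, PySem.List.pyRange_one_singleton]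
      rfl

-- ===== VERDICT (by name: the statement is the Claim_ definition above) =====
theorem split_if_large_spec : Claim_equal_split_if_large := by
  intro bs bn sb mx po hDom hPre
  have hbs : bs ≤ 2147483648 := by
    unfold Dom_split_if_large pvDomInt at hDom
    simp only [Bool.and_eq_true, decide_eq_true_eq] at hDom
    exact hDom.1.1.1.1.2
  have hf : bs.toNat < pvFuelA := by unfold pvFuelA; omega
  unfold Spec_split_if_large split_if_large split_if_large_alt
  rw [show pvFuelB = pvFuelA from rfl]
  exact splitA_eq sb mx po pvFuelA bs bn hf hPre
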